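-- pv_equiv track=rewrite | github.com/RealSaake/sentinal | test_agentic_system.py | _generate_naming_response
-- ===== SOURCE A (Python) =====
-- def _generate_naming_response(prompt: str) -> str:
--     """Generate realistic naming response."""
--     # Extract file name from prompt
--     lines = prompt.split('\n')
--     file_name = "unknown.txt"
--     category = "DOCUMENTS"
--
--     for line in lines:
--         if "File Name:" in line:
--             file_name = line.split("File Name:")[-1].strip()
--         elif "Category:" in line:
--             category = line.split("Category:")[-1].strip()
--
--     # Generate path based on category
--     if category == "CODE":
--         if ".py" in file_name:
--             suggested_path = f"code/python/scripts/{file_name}"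
--         elif ".js" in file_name:
--             suggested_path = f"code/javascript/web/{file_name}"
--         elif ".java" in file_name:
--             suggested_path = f"code/java/applications/{file_name}"
--         else:
--             suggested_path = f"code/misc/{file_name}"
--     elif category == "DOCUMENTS":
--         suggested_path = f"documents/text/{file_name}"
--     elif category == "MEDIA":
--         if ".jpg" in file_name or ".png" in file_name:
--             suggested_path = f"media/images/{file_name}"
--         elif ".mp4" in file_name:
--             suggested_path = f"media/videos/{file_name}"
--         else:
--             suggested_path = f"media/misc/{file_name}"
--     elif category == "ARCHIVES":
--         suggested_path = f"archives/game-assets/{file_name}"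
--     elif category == "DATA":
--         suggested_path = f"data/game-data/{file_name}"
--     else:
--         suggested_path = f"{category.lower()}/{file_name}"
--
--     return f'{{"suggested_path": "{suggested_path}", "confidence": 0.87, "reasoning": "Path generated following category conventions"}}'
-- ===== SOURCE B (Python) =====
-- _RULES = [
--     ("CODE", ".py", "code/python/scripts"),
--     ("CODE", ".js", "code/javascript/web"),
--     ("CODE", ".java", "code/java/applications"),
--     ("CODE", None, "code/misc"),
--     ("DOCUMENTS", None, "documents/text"),
--     ("MEDIA", ".jpg", "media/images"),
--     ("MEDIA", ".png", "media/images"),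
--     ("MEDIA", ".mp4", "media/videos"),
--     ("MEDIA", None, "media/misc"),
--     ("ARCHIVES", None, "archives/game-assets"),
--     ("DATA", None, "data/game-data"),
-- ]
--
--
-- def _last_field(text, marker, default):
--     """Value after the LAST occurrence of marker, up to end of its line."""
--     if marker in text:
--         return text.split(marker)[-1].split('\n')[0].strip()
--     return default
--
--
-- def _generate_naming_response(prompt: str) -> str:
--     """Generate realistic naming response (marker-split based)."""
--     file_name = _last_field(prompt, "File Name:", "unknown.txt")
--     # a line naming the file never contributes a category, so drop those lines
--     others = '\n'.join(l for l in prompt.split('\n') if "File Name:" not in l)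
--     category = _last_field(others, "Category:", "DOCUMENTS")
--     prefix = next((p for c, ext, p in _RULES
--                    if c == category and (ext is None or ext in file_name)),
--                   category.lower())
--     suggested_path = f"{prefix}/{file_name}"
--     return f'{{"suggested_path": "{suggested_path}", "confidence": 0.87, "reasoning": "Path generated following category conventions"}}'
-- ===== Notes on version B (the rewrite author's own statement) =====
-- stated objective: alternative
-- what changed: The stateful forward line loop is replaced by whole-string marker splits: file name = text after the last 'File Name:' in the prompt up to its line end, category = the same on the prompt with File-Name lines filtered out, and the nested category/extension if-elif chains become one ordered flat rule table (category, extension-substring-or-None, prefix) scanned for the first match with a lower-cased fallback.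
import Mathlib
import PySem

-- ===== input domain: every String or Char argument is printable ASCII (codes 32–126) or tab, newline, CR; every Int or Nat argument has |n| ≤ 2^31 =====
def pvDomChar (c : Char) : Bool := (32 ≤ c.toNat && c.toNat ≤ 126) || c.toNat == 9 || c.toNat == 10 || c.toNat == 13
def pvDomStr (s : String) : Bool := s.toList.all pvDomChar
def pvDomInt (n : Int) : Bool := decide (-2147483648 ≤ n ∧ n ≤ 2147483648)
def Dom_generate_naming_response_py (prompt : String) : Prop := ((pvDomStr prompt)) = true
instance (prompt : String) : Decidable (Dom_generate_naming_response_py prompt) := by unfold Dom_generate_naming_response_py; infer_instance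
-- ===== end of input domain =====

-- B replaces the stateful line loop by whole-string marker splits (with File-Name lines
-- filtered out before the Category split) and a flat ordered rule table (objective: alternative).

-- ===== PORT A =====
def pvExtractFile (line : String) : String :=
  PySem.Str.strip ((PySem.List.pyGet? ((PySem.Str.split? line "File Name:").getD []) (-1)).getD "")

def pvExtractCat (line : String) : String :=
  PySem.Str.strip ((PySem.List.pyGet? ((PySem.Str.split? line "Category:").getD []) (-1)).getD "")

def generate_naming_response_py (prompt : String) : String :=
  let lines := (PySem.Str.split? prompt "\n").getD []
  let st := lines.foldl (fun (s : String × String) line =>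
      if PySem.Str.isIn "File Name:" line then (pvExtractFile line, s.2)
      else if PySem.Str.isIn "Category:" line then (s.1, pvExtractCat line)
      else s) ("unknown.txt", "DOCUMENTS")
  let file_name := st.1
  let category := st.2
  let suggested_path :=
    if category == "CODE" then
      if PySem.Str.isIn ".py" file_name then "code/python/scripts/" ++ file_name
      else if PySem.Str.isIn ".js" file_name then "code/javascript/web/" ++ file_name
      else if PySem.Str.isIn ".java" file_name then "code/java/applications/" ++ file_name
      else "code/misc/" ++ file_name
    else if category == "DOCUMENTS" then "documents/text/" ++ file_name
    else if category == "MEDIA" then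
      if PySem.Str.isIn ".jpg" file_name || PySem.Str.isIn ".png" file_name then "media/images/" ++ file_name
      else if PySem.Str.isIn ".mp4" file_name then "media/videos/" ++ file_name
      else "media/misc/" ++ file_name
    else if category == "ARCHIVES" then "archives/game-assets/" ++ file_name
    else if category == "DATA" then "data/game-data/" ++ file_name
    else PySem.Str.lower category ++ "/" ++ file_name
  "{\"suggested_path\": \"" ++ suggested_path ++
    "\", \"confidence\": 0.87, \"reasoning\": \"Path generated following category conventions\"}"

-- ===== PORT B =====
def pvRules : List (String × Option String × String) :=
  [("CODE", some ".py", "code/python/scripts"),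
   ("CODE", some ".js", "code/javascript/web"),
   ("CODE", some ".java", "code/java/applications"),
   ("CODE", none, "code/misc"),
   ("DOCUMENTS", none, "documents/text"),
   ("MEDIA", some ".jpg", "media/images"),
   ("MEDIA", some ".png", "media/images"),
   ("MEDIA", some ".mp4", "media/videos"),
   ("MEDIA", none, "media/misc"),
   ("ARCHIVES", none, "archives/game-assets"),
   ("DATA", none, "data/game-data")]

-- text.split(marker)[-1].split('\n')[0].strip() if marker in text else default
def pvLastField (text marker dflt : String) : String :=
  if PySem.Str.isIn marker text then
    PySem.Str.strip
      ((PySem.List.pyGet?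
          ((PySem.Str.split?
              ((PySem.List.pyGet? ((PySem.Str.split? text marker).getD []) (-1)).getD "")
              "\n").getD [])
          0).getD "")
  else dflt

def generate_naming_response_py_alt (prompt : String) : String :=
  let file_name := pvLastField prompt "File Name:" "unknown.txt"
  let others := PySem.Str.join "\n"
      (((PySem.Str.split? prompt "\n").getD []).filter
        (fun l => !PySem.Str.isIn "File Name:" l))
  let category := pvLastField others "Category:" "DOCUMENTS"
  let prefix_ :=
    match pvRules.find? (fun r =>
        r.1 == category &&
        (match r.2.1 with
         | none => true
         | some ext => PySem.Str.isIn ext file_name)) with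
    | some r => r.2.2
    | none => PySem.Str.lower category
  let suggested_path := prefix_ ++ "/" ++ file_name
  "{\"suggested_path\": \"" ++ suggested_path ++
    "\", \"confidence\": 0.87, \"reasoning\": \"Path generated following category conventions\"}"

-- ===== PRECONDITION & SPEC =====
def Spec_generate_naming_response_py (prompt : String) (out : String) : Prop := out = generate_naming_response_py_alt prompt
instance (prompt : String) (out : String) : Decidable (Spec_generate_naming_response_py prompt out) := by unfold Spec_generate_naming_response_py; infer_instance

-- ===== CLAIM (what is proved, stated in full; the proofs are below) =====
def Claim_equal_generate_naming_response_py : Prop := ∀ (prompt : String), Dom_generate_naming_response_py prompt → Spec_generate_naming_response_py prompt (generate_naming_response_py prompt)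

-- ===== LEMMAS AND PROOFS =====

def pvSplitRec (s0 : Char) (sp : List Char) : List Char → List (List Char)
  | [] => [[]]
  | c :: rest =>
    if (s0 :: sp).isPrefixOf (c :: rest) then
      [] :: pvSplitRec s0 sp (rest.drop sp.length)
    else
      match pvSplitRec s0 sp rest with
      | [] => [[c]]
      | h :: t => (c :: h) :: t
termination_by l => l.length
decreasing_by all_goals simp <;> omega

theorem pvSplitRec_ne_nil (s0 : Char) (sp : List Char) (l : List Char) :
    pvSplitRec s0 sp l ≠ [] := by
  unfold pvSplitRec
  match l with
  | [] => simp
  | c :: rest =>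
    dsimp only
    split
    · simp
    · split <;> simp


theorem pvGo_eq (s0 : Char) (sp : List Char) :
    ∀ (fuel : Nat) (l cur : List Char) (acc : List (List Char)) (hf : l.length + 1 ≤ fuel),
    PySem.Chars.splitOn.go (s0 :: sp) fuel l cur acc =
      acc.reverse ++
        (match pvSplitRec s0 sp l with
         | [] => []
         | h :: t => (cur.reverse ++ h) :: t) := by
  intro fuel
  induction fuel with
  | zero => intro l cur acc hf; omega
  | succ f ih =>
    intro l cur acc hf
    match l with
    | [] =>
      rw [PySem.Chars.splitOn.go]
      simp [pvSplitRec]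
      omega
    | c :: rest =>
      rw [PySem.Chars.splitOn.go]
      by_cases hp : (s0 :: sp).isPrefixOf (c :: rest)
      · simp only [hp, if_true]
        have hlen : sp.length ≤ rest.length := by
          have := List.IsPrefix.length_le (List.isPrefixOf_iff_prefix.mp hp)
          simpa using this
        have hdrop : List.drop (s0 :: sp).length (c :: rest) = rest.drop sp.length := by
          simp
        rw [hdrop, ih (rest.drop sp.length) [] (cur.reverse :: acc) (by simp at hf ⊢; omega)]
        conv_rhs => rw [pvSplitRec]
        simp only [hp, if_true]
        rcases h : pvSplitRec s0 sp (rest.drop sp.length) with _ | ⟨h1, t1⟩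
        · exact absurd h (pvSplitRec_ne_nil _ _ _)
        · simp
      · simp only [hp, if_false]
        rw [ih rest (c :: cur) acc (by simp at hf ⊢; omega)]
        conv_rhs => rw [pvSplitRec]
        simp only [hp, if_false]
        rcases h : pvSplitRec s0 sp rest with _ | ⟨h1, t1⟩
        · exact absurd h (pvSplitRec_ne_nil _ _ _)
        · simp

theorem pvSplitOn_eq (s0 : Char) (sp : List Char) (s : List Char) :
    PySem.Chars.splitOn s (s0 :: sp) = pvSplitRec s0 sp s := by
  unfold PySem.Chars.splitOn
  rw [pvGo_eq s0 sp (s.length + 1) s [] [] (by omega)]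
  rcases h : pvSplitRec s0 sp s with _ | ⟨h1, t1⟩
  · exact absurd h (pvSplitRec_ne_nil _ _ _)
  · simp


theorem pvSingleton (s0 : Char) (sp : List Char) (l : List Char) :
    ∀ h, pvSplitRec s0 sp l = [h] → h = l := by
  induction l using pvSplitRec.induct s0 sp with
  | case1 => intro h hh; rw [pvSplitRec] at hh; simpa using hh.symm
  | case2 c rest hp ih =>
    intro h hh
    rw [pvSplitRec] at hh
    simp only [hp, if_true] at hh
    rcases hq : pvSplitRec s0 sp (rest.drop sp.length) with _ | ⟨h1, t1⟩
    · exact absurd hq (pvSplitRec_ne_nil _ _ _)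
    · rw [hq] at hh; simp at hh
  | case3 c rest hp hnil ih => exact absurd hnil (pvSplitRec_ne_nil _ _ _)
  | case4 c rest hp h1 t1 heq ih =>
    intro h hh
    rw [pvSplitRec] at hh
    simp only [hp, Bool.false_eq_true, if_false, heq] at hh
    simp at hh
    obtain ⟨rfl, rfl⟩ := hh
    have := ih h1 heq
    simp [this]

-- no occurrence of the separator ↔ split is the single original piece
theorem pvNoInfix (s0 : Char) (sp : List Char) (l : List Char)
    (h : ¬ (s0 :: sp) <:+: l) : pvSplitRec s0 sp l = [l] := by
  induction l using pvSplitRec.induct s0 sp with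
  | case1 => rw [pvSplitRec]
  | case2 c rest hp ih =>
    exact absurd ((List.isPrefixOf_iff_prefix.mp hp).isInfix) h
  | case3 c rest hp hnil ih => exact absurd hnil (pvSplitRec_ne_nil _ _ _)
  | case4 c rest hp h1 t1 heq ih =>
    rw [pvSplitRec]
    simp only [hp, Bool.false_eq_true, if_false, heq]
    have hrest : ¬ (s0 :: sp) <:+: rest := fun hh => h (hh.trans (List.suffix_cons c rest).isInfix)
    have := ih hrest
    rw [heq] at this
    simp at this
    obtain ⟨rfl, rfl⟩ := this
    rfl

theorem pvInfix_two (s0 : Char) (sp : List Char) (l : List Char)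
    (h : (s0 :: sp) <:+: l) : 2 ≤ (pvSplitRec s0 sp l).length := by
  induction l using pvSplitRec.induct s0 sp with
  | case1 => simp at h
  | case2 c rest hp ih =>
    rw [pvSplitRec]
    simp only [hp, if_true]
    have := pvSplitRec_ne_nil s0 sp (rest.drop sp.length)
    rcases hq : pvSplitRec s0 sp (rest.drop sp.length) with _ | ⟨h1, t1⟩
    · exact absurd hq this
    · simp
  | case3 c rest hp hnil ih => exact absurd hnil (pvSplitRec_ne_nil _ _ _)
  | case4 c rest hp h1 t1 heq ih =>
    rw [pvSplitRec]
    simp only [hp, Bool.false_eq_true, if_false, heq]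
    rcases List.infix_cons_iff.mp h with hpre | hinf
    · exact absurd (List.isPrefixOf_iff_prefix.mpr hpre) (by simpa using hp)
    · have := ih hinf
      rw [heq] at this
      simp at this ⊢
      omega

theorem pvGetLastD_cons {α : Type} (d : α) (x : α) (xs : List α) (h : xs ≠ []) :
    (x :: xs).getLastD d = xs.getLastD d := by
  rcases xs with _ | ⟨y, ys⟩
  · simp at h
  · simp [List.getLastD]

-- the last split piece is a suffix of the input
theorem pvLast_suffix (s0 : Char) (sp : List Char) (l : List Char) :
    (pvSplitRec s0 sp l).getLastD [] <:+ l := by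
  induction l using pvSplitRec.induct s0 sp with
  | case1 => rw [pvSplitRec]; simp
  | case2 c rest hp ih =>
    rw [pvSplitRec]
    simp only [hp, if_true]
    have hne := pvSplitRec_ne_nil s0 sp (rest.drop sp.length)
    rw [pvGetLastD_cons _ _ _ hne]
    exact ih.trans ((List.drop_suffix _ _).trans (List.suffix_cons c rest))
  | case3 c rest hp hnil ih => exact absurd hnil (pvSplitRec_ne_nil _ _ _)
  | case4 c rest hp h1 t1 heq ih =>
    rw [pvSplitRec]
    simp only [hp, Bool.false_eq_true, if_false, heq]
    rcases t1 with _ | ⟨t2, ts⟩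
    · have : h1 = rest := pvSingleton s0 sp rest h1 heq
      subst this
      simp
    · rw [heq] at ih
      rw [pvGetLastD_cons _ _ _ (by simp)]
      rw [pvGetLastD_cons _ _ _ (by simp)] at ih
      exact ih.trans (List.suffix_cons c rest)

-- a separator not containing nl cannot cross a nl boundary (prefix form)
theorem pvPrefix_boundary (sep a b : List Char) (nl : Char) (hnl : nl ∉ sep) :
    sep <+: a ++ nl :: b ↔ sep <+: a := by
  constructor
  · intro h
    have heq : sep = (a ++ nl :: b).take sep.length := List.prefix_iff_eq_take.mp h
    by_cases hlen : sep.length ≤ a.length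
    · rw [List.take_append_of_le_length hlen] at heq
      rw [List.prefix_iff_eq_take]
      exact heq
    · exfalso
      refine hnl ?_
      rw [heq, List.take_append]
      refine List.mem_append_right _ ?_
      rcases Nat.exists_eq_add_of_le (show 1 ≤ sep.length - a.length by omega) with ⟨k, hk⟩
      rw [show sep.length - a.length = k + 1 by omega]
      simp
  · intro h
    exact h.trans (List.prefix_append a (nl :: b))

-- infix splits across an excluded boundary character
theorem pvInfix_boundary (sep a b : List Char) (nl : Char) (hnl : nl ∉ sep) :
    sep <:+: a ++ nl :: b ↔ sep <:+: a ∨ sep <:+: b := by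
  induction a with
  | nil =>
    simp only [List.nil_append, List.infix_cons_iff]
    constructor
    · rintro (hpre | hinf)
      · rcases sep with _ | ⟨c, cs⟩
        · exact Or.inl List.nil_infix
        · exfalso
          have : c = nl := by
            have := List.prefix_iff_eq_take.mp hpre
            simpa using congrArg (fun l => l.headD nl) this
          exact hnl (this ▸ List.mem_cons_self)
      · exact Or.inr hinf
    · rintro (hinf | hinf)
      · rcases List.eq_nil_of_infix_nil hinf with rfl
        exact Or.inl (List.nil_prefix)
      · exact Or.inr hinf
  | cons c a' ih =>
    rw [List.cons_append, List.infix_cons_iff, List.infix_cons_iff, ih]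
    have hb := pvPrefix_boundary sep (c :: a') b nl hnl
    simp only [List.cons_append] at hb
    rw [hb]
    tauto

theorem pvDropLast_cons {α : Type} (x : α) (xs : List α) (h : xs ≠ []) :
    (x :: xs).dropLast = x :: xs.dropLast := by
  rcases xs with _ | ⟨y, ys⟩
  · simp at h
  · rfl

-- how Python split acts on text glued from two pieces by a character not in the separator
theorem pvSplitRec_append (s0 : Char) (sp : List Char) (nl : Char) (b : List Char)
    (hnl : nl ∉ s0 :: sp) (a : List Char) :
    pvSplitRec s0 sp (a ++ nl :: b) =
      (pvSplitRec s0 sp a).dropLast ++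
        ((pvSplitRec s0 sp a).getLastD [] ++ nl :: (pvSplitRec s0 sp b).headD []) ::
          (pvSplitRec s0 sp b).tail := by
  induction a using pvSplitRec.induct s0 sp with
  | case1 =>
    have hs0 : (s0 == nl) = false := by
      simp only [beq_eq_false_iff_ne]
      intro h
      exact hnl (by simp [h])
    have hp : (s0 :: sp).isPrefixOf (nl :: b) = false := by
      simp [List.isPrefixOf]
      simp at hs0
      exact fun hh => absurd hh hs0
    rw [List.nil_append]
    conv_lhs => rw [pvSplitRec]
    simp only [hp, Bool.false_eq_true, if_false]
    rcases hq : pvSplitRec s0 sp b with _ | ⟨hb, tb⟩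
    · exact absurd hq (pvSplitRec_ne_nil _ _ _)
    · simp [pvSplitRec, hq]
  | case2 c rest hp ih =>
    have hplen : sp.length ≤ rest.length := by
      have := List.IsPrefix.length_le (List.isPrefixOf_iff_prefix.mp hp)
      simpa using this
    have hp2 : (s0 :: sp).isPrefixOf ((c :: rest) ++ nl :: b) = true := by
      rw [List.isPrefixOf_iff_prefix]
      exact (pvPrefix_boundary _ _ _ _ hnl).mpr (List.isPrefixOf_iff_prefix.mp hp)
    rw [List.cons_append, pvSplitRec]
    simp only [show (s0 :: sp).isPrefixOf (c :: (rest ++ nl :: b)) = true by simpa using hp2, if_true]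
    have hdrop : List.drop sp.length (rest ++ nl :: b) = List.drop sp.length rest ++ nl :: b :=
      List.drop_append_of_le_length hplen
    rw [hdrop, ih]
    conv_rhs => rw [pvSplitRec]
    simp only [hp, if_true]
    have hne := pvSplitRec_ne_nil s0 sp (List.drop sp.length rest)
    rw [pvDropLast_cons _ _ hne, pvGetLastD_cons _ _ _ hne]
    simp
  | case3 c rest hp hnil ih => exact absurd hnil (pvSplitRec_ne_nil _ _ _)
  | case4 c rest hp h1 t1 heq ih =>
    have hp2 : ¬ (s0 :: sp).isPrefixOf ((c :: rest) ++ nl :: b) = true := by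
      rw [List.isPrefixOf_iff_prefix, pvPrefix_boundary _ _ _ _ hnl]
      rw [List.isPrefixOf_iff_prefix] at hp
      exact hp
    rw [List.cons_append, pvSplitRec]
    simp only [show ((s0 :: sp).isPrefixOf (c :: (rest ++ nl :: b))) = false by
        simpa using eq_false_of_ne_true hp2, Bool.false_eq_true, if_false]
    rw [ih, heq]
    conv_rhs => rw [pvSplitRec]
    simp only [hp, Bool.false_eq_true, if_false, heq]
    rcases t1 with _ | ⟨t2, ts⟩
    · simp [pvSplitRec]
    · rw [pvDropLast_cons h1 (t2 :: ts) (by simp)]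
      rw [pvGetLastD_cons _ h1 (t2 :: ts) (by simp), pvGetLastD_cons _ (c :: h1) (t2 :: ts) (by simp)]
      simp [pvDropLast_cons]

theorem pvGetLastD_append {α : Type} (d : α) (X : List α) (y : α) (t : List α) :
    (X ++ y :: t).getLastD d = (y :: t).getLastD d := by
  induction X with
  | nil => rfl
  | cons x xs ih =>
    rw [List.cons_append, pvGetLastD_cons _ _ _ (by simp)]
    exact ih

-- final piece of split of glued text: from the right piece if the separator occurs there
theorem pvLastPart_append (s0 : Char) (sp : List Char) (nl : Char) (a b : List Char)
    (hnl : nl ∉ s0 :: sp) :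
    (pvSplitRec s0 sp (a ++ nl :: b)).getLastD [] =
      if (s0 :: sp) <:+: b then (pvSplitRec s0 sp b).getLastD []
      else (pvSplitRec s0 sp a).getLastD [] ++ nl :: b := by
  rw [pvSplitRec_append s0 sp nl b hnl a, pvGetLastD_append]
  by_cases hb : (s0 :: sp) <:+: b
  · simp only [hb, if_true]
    have h2 := pvInfix_two s0 sp b hb
    rcases hq : pvSplitRec s0 sp b with _ | ⟨h1, t1⟩
    · exact absurd hq (pvSplitRec_ne_nil _ _ _)
    · rcases t1 with _ | ⟨t2, ts⟩
      · rw [hq] at h2; simp at h2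
      · simp only [List.tail_cons, List.headD_cons]
        rw [pvGetLastD_cons _ _ (t2 :: ts) (by simp), pvGetLastD_cons _ h1 (t2 :: ts) (by simp)]
  · simp only [hb, if_false]
    rw [pvNoInfix s0 sp b hb]
    simp

theorem pvPyGet_neg_one {α : Type} (xs : List α) (d : α) (h : xs ≠ []) :
    (PySem.List.pyGet? xs (-1)).getD d = xs.getLastD d := by
  have hlen : 1 ≤ xs.length := by
    rcases xs with _ | _
    · simp at h
    · simp
  simp only [PySem.List.pyGet?, PySem.List.pyIdx?]
  rw [if_neg (by omega), if_pos (by push_cast; omega)]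
  simp only [Option.bind_some]
  have : xs.length - ((1 : Int)).toNat = xs.length - 1 := by
    norm_num
  rw [show ((-(-1 : Int)).toNat) = 1 from rfl]
  rw [List.getElem?_eq_getElem (by omega)]
  simp [List.getLastD_eq_getLast?, List.getLast?_eq_getElem?, List.getElem?_eq_getElem (by omega : xs.length - 1 < xs.length)]

theorem pvPyGet_zero {α : Type} (xs : List α) (d : α) (h : xs ≠ []) :
    (PySem.List.pyGet? xs 0).getD d = xs.headD d := by
  have hlen : 1 ≤ xs.length := by
    rcases xs with _ | _
    · simp at h
    · simp
  simp only [PySem.List.pyGet?, PySem.List.pyIdx?]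
  rw [if_pos (by omega), if_pos (by push_cast; omega)]
  simp only [Option.bind_some, Int.toNat_zero]
  rw [List.getElem?_eq_getElem (by omega)]
  rcases xs with _ | ⟨x, xs⟩
  · simp at h
  · simp

-- single-character separator: first piece, nl-freeness, and join roundtrip
theorem pvHead_single (nl : Char) (l : List Char) :
    (pvSplitRec nl [] l).headD [] = l.takeWhile (fun c => c != nl) := by
  induction l with
  | nil => rw [pvSplitRec]; simp
  | cons c rest ih =>
    rw [pvSplitRec]
    by_cases hc : nl = c
    · subst hc
      rw [if_pos (by simp [List.isPrefixOf])]
      simp [List.takeWhile_cons]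
    · rw [if_neg (by simp [List.isPrefixOf]; intro hh; exact hc hh)]
      rcases hq : pvSplitRec nl [] rest with _ | ⟨h1, t1⟩
      · exact absurd hq (pvSplitRec_ne_nil _ _ _)
      · rw [hq] at ih
        simp only [List.headD_cons] at ih
        have hcne : (c != nl) = true := by
          simp [bne]
          exact fun hh => hc hh.symm
        simp [List.takeWhile_cons, hcne, ih]

theorem pvParts_single (nl : Char) (l : List Char) :
    ∀ p ∈ pvSplitRec nl [] l, nl ∉ p := by
  induction l with
  | nil => rw [pvSplitRec]; simp
  | cons c rest ih =>
    rw [pvSplitRec]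
    by_cases hc : nl = c
    · subst hc
      rw [if_pos (by simp [List.isPrefixOf])]
      intro p hp
      rcases List.mem_cons.mp hp with rfl | hp
      · simp
      · exact ih p (by simpa using hp)
    · rw [if_neg (by simp [List.isPrefixOf]; intro hh; exact hc hh)]
      rcases hq : pvSplitRec nl [] rest with _ | ⟨h1, t1⟩
      · exact absurd hq (pvSplitRec_ne_nil _ _ _)
      · intro p hp
        rcases List.mem_cons.mp hp with rfl | hp
        · intro hmem
          rcases List.mem_cons.mp hmem with heq2 | hmem
          · exact hc heq2
          · exact ih h1 (by rw [hq]; simp) hmem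
        · exact ih p (by rw [hq]; simp [hp])

theorem pvIntercalate_cons_cons {α : Type} (sep x y : List α) (t : List (List α)) :
    sep.intercalate (x :: y :: t) = x ++ sep ++ sep.intercalate (y :: t) := by
  simp [List.intercalate, List.intersperse]

theorem pvJoin_single (nl : Char) (l : List Char) :
    [nl].intercalate (pvSplitRec nl [] l) = l := by
  induction l with
  | nil => rw [pvSplitRec]; simp [List.intercalate]
  | cons c rest ih =>
    rw [pvSplitRec]
    by_cases hc : nl = c
    · subst hc
      rw [if_pos (by simp [List.isPrefixOf])]
      rcases hq : pvSplitRec nl [] rest with _ | ⟨h1, t1⟩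
      · exact absurd hq (pvSplitRec_ne_nil _ _ _)
      · rw [hq] at ih
        simp only [List.drop_nil, List.length_nil, List.drop_zero, hq]
        rw [pvIntercalate_cons_cons]
        simp [ih]
    · rw [if_neg (by simp [List.isPrefixOf]; intro hh; exact hc hh)]
      rcases hq : pvSplitRec nl [] rest with _ | ⟨h1, t1⟩
      · exact absurd hq (pvSplitRec_ne_nil _ _ _)
      · rw [hq] at ih
        rcases t1 with _ | ⟨t2, ts⟩
        · simp [List.intercalate] at ih ⊢
          simp [ih]
        · rw [pvIntercalate_cons_cons] at ih ⊢
          simp at ih ⊢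
          simp [← ih]

theorem pvTakeWhile_of_not_mem (nl : Char) (x : List Char) (h : nl ∉ x) :
    x.takeWhile (fun c => c != nl) = x := by
  rw [List.takeWhile_eq_self_iff]
  intro a ha
  simp [bne]
  intro hh
  exact h (hh ▸ ha)

theorem pvTakeWhile_boundary (nl : Char) (x y : List Char) :
    (x ++ nl :: y).takeWhile (fun c => c != nl) = x.takeWhile (fun c => c != nl) := by
  rw [List.takeWhile_append]
  split
  · rename_i hlen
    have hx : x.takeWhile (fun c => c != nl) = x := (List.takeWhile_prefix _).eq_of_length hlen
    simp [List.takeWhile_cons, hx]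
  · rfl

theorem pvIntercalate_append_single (nl : Char) (ls : List (List Char)) (t : List Char)
    (h : ls ≠ []) :
    [nl].intercalate (ls ++ [t]) = [nl].intercalate ls ++ nl :: t := by
  induction ls with
  | nil => simp at h
  | cons x xs ih =>
    rcases xs with _ | ⟨y, ys⟩
    · simp [List.intercalate, List.intersperse]
    · have h1 : (x :: y :: ys) ++ [t] = x :: y :: (ys ++ [t]) := by simp
      rw [h1, pvIntercalate_cons_cons]
      have h2 := ih (by simp)
      rw [show (y :: ys) ++ [t] = y :: (ys ++ [t]) by simp] at h2
      rw [h2, pvIntercalate_cons_cons]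
      simp

def pvLastFieldC (s0 : Char) (sp : List Char) (nl : Char) (dflt : List Char) (text : List Char) : List Char :=
  if (s0 :: sp) <:+: text then
    PySem.Chars.strip (((pvSplitRec s0 sp text).getLastD []).takeWhile (fun c => c != nl))
  else dflt

-- extraction by whole-text split equals last-matching-line extraction
theorem pvMainC (s0 : Char) (sp : List Char) (nl : Char) (hnl : nl ∉ s0 :: sp)
    (dflt : List Char) (ls : List (List Char)) :
    (∀ l ∈ ls, nl ∉ l) →
    pvLastFieldC s0 sp nl dflt ([nl].intercalate ls) =
      match ls.reverse.find? (fun l => decide ((s0 :: sp) <:+: l)) with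
      | some l => PySem.Chars.strip ((pvSplitRec s0 sp l).getLastD [])
      | none => dflt := by
  induction ls using List.reverseRecOn with
  | nil =>
    intro _
    rw [show [nl].intercalate ([] : List (List Char)) = [] by simp [List.intercalate]]
    simp only [List.reverse_nil, List.find?_nil]
    rw [pvLastFieldC, if_neg (by simp)]
  | append_singleton ls' t ih =>
    intro hfree
    have hfree' : ∀ l ∈ ls', nl ∉ l := fun l hl => hfree l (List.mem_append_left _ hl)
    have hft : nl ∉ t := hfree t (List.mem_append_right _ (List.mem_singleton.mpr rfl))
    have hrev : (ls' ++ [t]).reverse = t :: ls'.reverse := by simp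
    rcases List.eq_nil_or_concat ls' with rfl | _
    · simp only [List.nil_append, List.reverse_singleton, List.find?_cons]
      have hlp : nl ∉ (pvSplitRec s0 sp t).getLastD [] :=
        fun hm => hft ((pvLast_suffix s0 sp t).sublist.subset hm)
      rw [show [nl].intercalate [t] = t by simp [List.intercalate]]
      by_cases hin : (s0 :: sp) <:+: t
      · simp only [hin, decide_true]
        rw [pvLastFieldC, if_pos hin, pvTakeWhile_of_not_mem nl _ hlp]
      · simp only [hin, decide_false]
        rw [pvLastFieldC, if_neg hin]
        simp
    · have hne : ls' ≠ [] := by rename_i h'; rcases h' with ⟨a, b, rfl⟩; simp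
      rw [pvIntercalate_append_single nl ls' t hne, hrev, List.find?_cons]
      by_cases hin : (s0 :: sp) <:+: t
      · simp only [hin, decide_true]
        have hlp : nl ∉ (pvSplitRec s0 sp t).getLastD [] :=
          fun hm => hft ((pvLast_suffix s0 sp t).sublist.subset hm)
        rw [pvLastFieldC,
          if_pos ((pvInfix_boundary _ _ _ _ hnl).mpr (Or.inr hin)),
          pvLastPart_append s0 sp nl _ t hnl, if_pos hin,
          pvTakeWhile_of_not_mem nl _ hlp]
      · simp only [hin, decide_false]
        rw [← ih hfree']
        rw [pvLastFieldC, pvLastFieldC]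
        by_cases hja : (s0 :: sp) <:+: [nl].intercalate ls'
        · have hcomb : (s0 :: sp) <:+: [nl].intercalate ls' ++ nl :: t :=
            (pvInfix_boundary _ _ _ _ hnl).mpr (Or.inl hja)
          rw [if_pos hcomb, if_pos hja,
            pvLastPart_append s0 sp nl _ t hnl, if_neg hin,
            pvTakeWhile_boundary]
        · have hcomb : ¬ (s0 :: sp) <:+: [nl].intercalate ls' ++ nl :: t := by
            intro h
            rcases (pvInfix_boundary _ _ _ _ hnl).mp h with h' | h'
            · exact hja h'
            · exact hin h'
          rw [if_neg hcomb, if_neg hja]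

theorem pvIsIn_decide (sub s : String) :
    PySem.Str.isIn sub s = decide (sub.toList <:+: s.toList) := by
  rw [Bool.eq_iff_iff, PySem.Str.isIn_iff_infix]
  simp

theorem pvSplit?_some (s sep : String) (h : sep.toList ≠ []) :
    ∃ L, PySem.Str.split? s sep = some L ∧
      L.map String.toList = PySem.Chars.splitOn s.toList sep.toList := by
  have hb := PySem.Str.split?_map s sep
  rw [PySem.Chars.split?] at hb
  rw [if_neg (by simpa using h)] at hb
  rcases hL : PySem.Str.split? s sep with _ | L
  · rw [hL] at hb; simp at hb
  · rw [hL] at hb; simp at hb; exact ⟨L, rfl, hb⟩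

theorem pvGetLastD_map_toList (L : List String) :
    (L.getLastD "").toList = (L.map String.toList).getLastD [] := by
  induction L with
  | nil => simp
  | cons x xs ih =>
    rcases xs with _ | ⟨y, ys⟩
    · simp
    · rw [pvGetLastD_cons _ x (y :: ys) (by simp), List.map_cons,
        pvGetLastD_cons _ x.toList ((y :: ys).map String.toList) (by simp)]
      exact ih

theorem pvHeadD_map_toList (L : List String) :
    (L.headD "").toList = (L.map String.toList).headD [] := by
  rcases L with _ | ⟨x, xs⟩ <;> simp


-- B's field extraction, expressed through pvLastFieldC
theorem pvLastField_eq (text marker dflt : String) (s0 : Char) (sp : List Char)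
    (hm : marker.toList = s0 :: sp) :
    pvLastField text marker dflt =
      String.ofList (pvLastFieldC s0 sp '\n' dflt.toList text.toList) := by
  rw [pvLastField, pvLastFieldC, pvIsIn_decide, hm]
  by_cases hin : (s0 :: sp) <:+: text.toList
  · rw [if_pos (by simpa using hin), if_pos hin]
    obtain ⟨L, hL, hLm⟩ := pvSplit?_some text marker (by simp [hm])
    rw [hm, pvSplitOn_eq] at hLm
    rw [hL]
    simp only [Option.getD_some]
    have hLne : L ≠ [] := fun h => pvSplitRec_ne_nil s0 sp text.toList (by rw [← hLm, h]; rfl)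
    rw [pvPyGet_neg_one L "" hLne]
    have hlast : (L.getLastD "").toList = (pvSplitRec s0 sp text.toList).getLastD [] := by
      rw [pvGetLastD_map_toList, hLm]
    obtain ⟨L2, hL2, hL2m⟩ := pvSplit?_some (L.getLastD "") "\n" (by decide)
    rw [show ("\n" : String).toList = ['\n'] from rfl, pvSplitOn_eq] at hL2m
    rw [hL2]
    simp only [Option.getD_some]
    have hL2ne : L2 ≠ [] := fun h =>
      pvSplitRec_ne_nil '\n' [] (L.getLastD "").toList (by rw [← hL2m, h]; rfl)
    rw [pvPyGet_zero L2 "" hL2ne]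
    rw [PySem.Str.strip]
    congr 1
    rw [pvHeadD_map_toList, hL2m, pvHead_single, hlast]
  · rw [if_neg (by simpa using hin), if_neg hin]
    simp

-- A's per-line extraction, through pvSplitRec
theorem pvExtract_eq (l marker : String) (s0 : Char) (sp : List Char)
    (hm : marker.toList = s0 :: sp) :
    PySem.Str.strip ((PySem.List.pyGet? ((PySem.Str.split? l marker).getD []) (-1)).getD "") =
      String.ofList (PySem.Chars.strip ((pvSplitRec s0 sp l.toList).getLastD [])) := by
  obtain ⟨L, hL, hLm⟩ := pvSplit?_some l marker (by simp [hm])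
  rw [hm, pvSplitOn_eq] at hLm
  rw [hL]
  simp only [Option.getD_some]
  have hLne : L ≠ [] := fun h => pvSplitRec_ne_nil s0 sp l.toList (by rw [← hLm, h]; rfl)
  rw [pvPyGet_neg_one L "" hLne, PySem.Str.strip]
  congr 1
  rw [pvGetLastD_map_toList, hLm]

theorem pvFind?_filter_bool {α : Type} (xs : List α) (p q : α → Bool) :
    (xs.filter p).find? q = xs.find? (fun a => p a && q a) := by
  rw [List.find?_filter]
  congr 1
  funext a
  cases hp : p a <;> cases hq : q a <;> simp [hp, hq]

-- master per-field lemma: B's whole-text extraction = last-matching-line extraction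
theorem pvField_master (marker dflt : String) (s0 : Char) (sp : List Char)
    (hm : marker.toList = s0 :: sp) (hnl : '\n' ∉ s0 :: sp) (ls : List String)
    (hfree : ∀ l ∈ ls, '\n' ∉ l.toList) :
    pvLastField (PySem.Str.join "\n" ls) marker dflt =
      match ls.reverse.find? (fun l => PySem.Str.isIn marker l) with
      | some l => PySem.Str.strip ((PySem.List.pyGet? ((PySem.Str.split? l marker).getD []) (-1)).getD "")
      | none => dflt := by
  rw [pvLastField_eq _ _ _ _ _ hm]
  have hjoin : (PySem.Str.join "\n" ls).toList = ['\n'].intercalate (ls.map String.toList) := by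
    simp [PySem.Str.join, PySem.Chars.join]
  rw [hjoin, pvMainC s0 sp '\n' hnl dflt.toList (ls.map String.toList)
    (by intro l hl; obtain ⟨x, hx, rfl⟩ := List.mem_map.mp hl; exact hfree x hx)]
  rw [← List.map_reverse, List.find?_map]
  have hpred : ((fun l => decide ((s0 :: sp) <:+: l)) ∘ String.toList) =
      (fun l => PySem.Str.isIn marker l) := by
    funext l
    rw [pvIsIn_decide, hm]
    rfl
  rw [hpred]
  rcases hf : ls.reverse.find? (fun l => PySem.Str.isIn marker l) with _ | l
  · simp
  · simp only [Option.map_some]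
    rw [pvExtract_eq l marker s0 sp hm]

def pvStep (s : String × String) (line : String) : String × String :=
  if PySem.Str.isIn "File Name:" line then (pvExtractFile line, s.2)
  else if PySem.Str.isIn "Category:" line then (s.1, pvExtractCat line)
  else s

theorem pvFold_fst (lines : List String) (init : String × String) :
    (lines.foldl pvStep init).1 =
      match lines.reverse.find? (fun l => PySem.Str.isIn "File Name:" l) with
      | some l => pvExtractFile l
      | none => init.1 := by
  induction lines using List.reverseRecOn generalizing init with
  | nil => rfl
  | append_singleton xs x ih =>
    rw [List.foldl_append, List.reverse_append, List.reverse_singleton, List.singleton_append,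
      List.find?_cons]
    simp only [List.foldl_cons, List.foldl_nil]
    cases hf : PySem.Str.isIn "File Name:" x with
    | true => simp_all [pvStep]
    | false =>
      cases hc : PySem.Str.isIn "Category:" x with
      | true => simp_all [pvStep]
      | false => simp_all [pvStep, ih]

theorem pvFold_snd (lines : List String) (init : String × String) :
    (lines.foldl pvStep init).2 =
      match lines.reverse.find? (fun l => !PySem.Str.isIn "File Name:" l && PySem.Str.isIn "Category:" l) with
      | some l => pvExtractCat l
      | none => init.2 := by
  induction lines using List.reverseRecOn generalizing init with
  | nil => rfl
  | append_singleton xs x ih =>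
    rw [List.foldl_append, List.reverse_append, List.reverse_singleton, List.singleton_append,
      List.find?_cons]
    simp only [List.foldl_cons, List.foldl_nil]
    cases hf : PySem.Str.isIn "File Name:" x with
    | true => simp_all [pvStep]
    | false =>
      cases hc : PySem.Str.isIn "Category:" x with
      | true => simp_all [pvStep]
      | false => simp_all [pvStep, ih]

-- the nested category/extension chain equals the flat-rule-table lookup
theorem pvPath_eq (fn cat : String) :
    (if cat == "CODE" then
      if PySem.Str.isIn ".py" fn then "code/python/scripts/" ++ fn
      else if PySem.Str.isIn ".js" fn then "code/javascript/web/" ++ fn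
      else if PySem.Str.isIn ".java" fn then "code/java/applications/" ++ fn
      else "code/misc/" ++ fn
    else if cat == "DOCUMENTS" then "documents/text/" ++ fn
    else if cat == "MEDIA" then
      if PySem.Str.isIn ".jpg" fn || PySem.Str.isIn ".png" fn then "media/images/" ++ fn
      else if PySem.Str.isIn ".mp4" fn then "media/videos/" ++ fn
      else "media/misc/" ++ fn
    else if cat == "ARCHIVES" then "archives/game-assets/" ++ fn
    else if cat == "DATA" then "data/game-data/" ++ fn
    else PySem.Str.lower cat ++ "/" ++ fn) =
    (match pvRules.find? (fun r =>
        r.1 == cat &&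
        (match r.2.1 with
         | none => true
         | some ext => PySem.Str.isIn ext fn)) with
      | some r => r.2.2
      | none => PySem.Str.lower cat) ++ "/" ++ fn := by
  by_cases h1 : cat = "CODE"
  · subst h1
    simp only [beq_self_eq_true, if_true, pvRules, List.find?]
    cases hpy : PySem.Str.isIn ".py" fn <;> cases hjs : PySem.Str.isIn ".js" fn <;>
      cases hjava : PySem.Str.isIn ".java" fn <;> simp_all <;> rfl
  by_cases h3 : cat = "MEDIA"
  · subst h3
    simp only [beq_iff_eq, String.reduceEq, if_false, beq_self_eq_true, if_true, pvRules, List.find?]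
    cases hjpg : PySem.Str.isIn ".jpg" fn <;> cases hpng : PySem.Str.isIn ".png" fn <;>
      cases hmp4 : PySem.Str.isIn ".mp4" fn <;> simp_all <;> rfl
  by_cases h2 : cat = "DOCUMENTS"
  · subst h2; simp [pvRules, List.find?]; rfl
  by_cases h4 : cat = "ARCHIVES"
  · subst h4; simp [pvRules, List.find?]; rfl
  by_cases h5 : cat = "DATA"
  · subst h5; simp [pvRules, List.find?]; rfl
  · have e1 : (cat == "CODE") = false := by simp [h1]
    have e2 : (cat == "DOCUMENTS") = false := by simp [h2]
    have e3 : (cat == "MEDIA") = false := by simp [h3]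
    have e4 : (cat == "ARCHIVES") = false := by simp [h4]
    have e5 : (cat == "DATA") = false := by simp [h5]
    have f1 : ("CODE" == cat) = false := by simp; exact fun h => h1 h.symm
    have f2 : ("DOCUMENTS" == cat) = false := by simp; exact fun h => h2 h.symm
    have f3 : ("MEDIA" == cat) = false := by simp; exact fun h => h3 h.symm
    have f4 : ("ARCHIVES" == cat) = false := by simp; exact fun h => h4 h.symm
    have f5 : ("DATA" == cat) = false := by simp; exact fun h => h5 h.symm
    simp [pvRules, List.find?, e1, e2, e3, e4, e5, f1, f2, f3, f4, f5]

-- ===== VERDICT (by name: the statement is the Claim_ definition above) =====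
theorem generate_naming_response_py_spec : Claim_equal_generate_naming_response_py := by
  intro prompt _
  unfold Spec_generate_naming_response_py generate_naming_response_py generate_naming_response_py_alt
  dsimp only
  rw [show (fun (s : String × String) line =>
      if PySem.Str.isIn "File Name:" line then (pvExtractFile line, s.2)
      else if PySem.Str.isIn "Category:" line then (s.1, pvExtractCat line)
      else s) = pvStep from rfl]
  rw [pvFold_fst, pvFold_snd]
  obtain ⟨L, hL, hLm⟩ := pvSplit?_some prompt "\n" (by decide)
  rw [show ("\n" : String).toList = ['\n'] from rfl, pvSplitOn_eq] at hLm
  have hlines : ((PySem.Str.split? prompt "\n").getD []).map String.toList =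
      pvSplitRec '\n' [] prompt.toList := by
    rw [hL]
    simpa using hLm
  have hfree : ∀ l ∈ (PySem.Str.split? prompt "\n").getD [], '\n' ∉ l.toList := by
    intro l hl
    have hmem : l.toList ∈ ((PySem.Str.split? prompt "\n").getD []).map String.toList :=
      List.mem_map_of_mem hl
    rw [hlines] at hmem
    exact pvParts_single '\n' prompt.toList l.toList hmem
  have hjoin : PySem.Str.join "\n" ((PySem.Str.split? prompt "\n").getD []) = prompt := by
    apply String.toList_inj.mp
    rw [show (PySem.Str.join "\n" ((PySem.Str.split? prompt "\n").getD [])).toList =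
        ['\n'].intercalate (((PySem.Str.split? prompt "\n").getD []).map String.toList) by
      simp [PySem.Str.join, PySem.Chars.join]]
    rw [hlines, pvJoin_single]
  have hfile := pvField_master "File Name:" "unknown.txt" 'F'
    ['i','l','e',' ','N','a','m','e',':'] rfl (by decide)
    ((PySem.Str.split? prompt "\n").getD []) hfree
  rw [hjoin] at hfile
  have hcat := pvField_master "Category:" "DOCUMENTS" 'C'
    ['a','t','e','g','o','r','y',':'] rfl (by decide)
    (((PySem.Str.split? prompt "\n").getD []).filter (fun l => !PySem.Str.isIn "File Name:" l))
    (fun l hl => hfree l (List.mem_of_mem_filter hl))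
  rw [show (((PySem.Str.split? prompt "\n").getD []).filter
        (fun l => !PySem.Str.isIn "File Name:" l)).reverse.find?
        (fun l => PySem.Str.isIn "Category:" l) =
      ((PySem.Str.split? prompt "\n").getD []).reverse.find?
        (fun l => !PySem.Str.isIn "File Name:" l && PySem.Str.isIn "Category:" l) by
    rw [← List.filter_reverse, pvFind?_filter_bool]] at hcat
  rw [hfile, hcat, pvPath_eq]
  simp only [pvExtractFile, pvExtractCat, String.append_assoc]
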